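-- pv_equiv track=rewrite | github.com/FilippGilev/Lab4 | Hash.py | chains_resize
-- ===== SOURCE A (Python) =====
-- def hash_function(value, table_size):
--    return value % table_size
--
-- def chains_resize(hash_table, new_size):
--     new_hash_table = {}
--     for key, values in hash_table.items():
--         for value in values:
--             new_key = hash_function(value, new_size)
--             if new_key not in new_hash_table:
--                 new_hash_table[new_key] = [value]
--             else:
--                 new_hash_table[new_key].append(value)
--     return new_hash_table
-- ===== SOURCE B (Python) =====
-- def chains_resize(hash_table, new_size):
--     flat = [v for values in hash_table.values() for v in values]
--     keys = dict.fromkeys(v % new_size for v in flat)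
--     return {k: [v for v in flat if v % new_size == k] for k in keys}
-- ===== Notes on version B (the rewrite author's own statement) =====
-- stated objective: simpler
-- what changed: Replaces the single-pass dict-bucketing loop (insert-or-append per value) with a three-line flatten / first-occurrence key list / per-key filter comprehension over the flattened values.
import Mathlib
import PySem

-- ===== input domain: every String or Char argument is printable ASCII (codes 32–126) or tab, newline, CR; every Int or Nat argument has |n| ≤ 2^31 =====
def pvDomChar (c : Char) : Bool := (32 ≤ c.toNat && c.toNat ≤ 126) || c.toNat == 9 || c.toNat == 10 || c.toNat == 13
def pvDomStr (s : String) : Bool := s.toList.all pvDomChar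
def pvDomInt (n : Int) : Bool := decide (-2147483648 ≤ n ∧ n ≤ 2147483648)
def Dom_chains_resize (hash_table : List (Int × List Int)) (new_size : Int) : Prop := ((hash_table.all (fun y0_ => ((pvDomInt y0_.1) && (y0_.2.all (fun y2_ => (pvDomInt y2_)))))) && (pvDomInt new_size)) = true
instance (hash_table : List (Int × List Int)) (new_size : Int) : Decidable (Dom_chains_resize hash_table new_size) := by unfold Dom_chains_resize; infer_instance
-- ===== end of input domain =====

-- B replaces A's one-pass insert-or-append dict bucketing by flatten / first-occurrence key list /
-- per-key filter; objective: simpler (shorter, no mutation), not faster.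

-- ===== PORT A =====
def chains_resize (hash_table : List (Int × List Int)) (new_size : Int) : List (Int × List Int) :=
  (hash_table.foldl
    (fun new_hash_table kv =>
      kv.2.foldl
        (fun new_hash_table value =>
          let new_key := PySem.Int.mod value new_size   -- hash_function(value, new_size)
          if ¬ new_hash_table.contains new_key then
            new_hash_table.insert new_key [value]
          else
            new_hash_table.modify new_key [] (fun l => l ++ [value]))
        new_hash_table)
    PySem.Dict.empty).items

-- ===== PORT B =====
def chains_resize_alt (hash_table : List (Int × List Int)) (new_size : Int) : List (Int × List Int) :=
  let flat := hash_table.flatMap (fun kv => kv.2)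
  let keys := PySem.List.dedup (flat.map (fun v => PySem.Int.mod v new_size))
  keys.map (fun k => (k, flat.filter (fun v => PySem.Int.mod v new_size == k)))

-- ===== PRECONDITION & SPEC =====
-- Pre_ excludes exactly the inputs on which Python A raises ZeroDivisionError:
-- new_size = 0 with at least one stored value (with no values, no modulo is taken and A returns {}).
def Pre_chains_resize (hash_table : List (Int × List Int)) (new_size : Int) : Prop :=
  new_size ≠ 0 ∨ hash_table.all (fun kv => kv.2.isEmpty) = true
instance (hash_table : List (Int × List Int)) (new_size : Int) : Decidable (Pre_chains_resize hash_table new_size) := by unfold Pre_chains_resize; infer_instance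

def pvWitness_chains_resize : (List (Int × List Int)) × Int := ([(0, [1, 2, 3]), (1, [4, -5])], 2)

def Spec_chains_resize (hash_table : List (Int × List Int)) (new_size : Int) (out : List (Int × List Int)) : Prop := out = chains_resize_alt hash_table new_size
instance (hash_table : List (Int × List Int)) (new_size : Int) (out : List (Int × List Int)) : Decidable (Spec_chains_resize hash_table new_size out) := by unfold Spec_chains_resize; infer_instance

-- ===== CLAIM (what is proved, stated in full; the proofs are below) =====
def Claim_equal_chains_resize : Prop := ∀ (hash_table : List (Int × List Int)) (new_size : Int), Dom_chains_resize hash_table new_size → Pre_chains_resize hash_table new_size → Spec_chains_resize hash_table new_size (chains_resize hash_table new_size)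

-- ===== LEMMAS AND PROOFS =====

-- A's if/else body is exactly one Dict.modify (insert on a fresh key is modify with default []).
theorem pv_step_eq_modify (d : PySem.Dict Int (List Int)) (k v : Int) :
    (if ¬ d.contains k then d.insert k [v] else d.modify k [] (fun l => l ++ [v]))
      = d.modify k [] (fun l => l ++ [v]) := by
  by_cases h : d.contains k = true
  · simp [h]
  · have hg : d.getD k [] = [] :=
      PySem.Dict.getD_of_not_contains (d := d) (k := k) (d0 := []) (h := by simpa using h)
    simp [h, PySem.Dict.modify, hg]

-- the nested loop over buckets is a single loop over the flattened value list
theorem pv_foldl_flat {α : Type} (g : PySem.Dict Int (List Int) → α → PySem.Dict Int (List Int))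
    (ht : List (Int × List α)) (d : PySem.Dict Int (List Int)) :
    ht.foldl (fun d kv => kv.2.foldl g d) d = (ht.flatMap (fun kv => kv.2)).foldl g d := by
  induction ht generalizing d with
  | nil => rfl
  | cons p t ih => simp [List.flatMap_cons, List.foldl_append, ih]

theorem chains_resize_eq_alt (hash_table : List (Int × List Int)) (new_size : Int) :
    chains_resize hash_table new_size = chains_resize_alt hash_table new_size := by
  unfold chains_resize chains_resize_alt
  have hstep : (fun (d : PySem.Dict Int (List Int)) (value : Int) =>
      let new_key := PySem.Int.mod value new_size
      if ¬ d.contains new_key then d.insert new_key [value]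
      else d.modify new_key [] (fun l => l ++ [value]))
      = fun d value => d.modify (PySem.Int.mod value new_size) [] (fun l => l ++ [value]) := by
    funext d value
    exact pv_step_eq_modify d (PySem.Int.mod value new_size) value
  rw [pv_foldl_flat, hstep]
  set flat := hash_table.flatMap (fun kv => kv.2) with hflat
  have hnodup : (flat.foldl (fun d value =>
      d.modify (PySem.Int.mod value new_size) [] (fun l => l ++ [value])) PySem.Dict.empty).keys.Nodup :=
    PySem.Dict.nodup_keys_foldl_modify_key flat (fun v => PySem.Int.mod v new_size) []
      (fun _ v l => l ++ [v]) PySem.Dict.empty (by simp)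
  rw [PySem.Dict.items_eq_map_keys _ hnodup []]
  have hkeys : (flat.foldl (fun d value =>
      d.modify (PySem.Int.mod value new_size) [] (fun l => l ++ [value])) PySem.Dict.empty).keys
      = PySem.List.dedup (flat.map (fun v => PySem.Int.mod v new_size)) := by
    rw [PySem.Dict.keys_foldl_modify_key flat (fun v => PySem.Int.mod v new_size) []
      (fun _ v l => l ++ [v]) PySem.Dict.empty]
    simp [PySem.Set.update, PySem.List.dedup, PySem.Set.ofList]
  rw [hkeys]
  refine List.map_congr_left (fun k hk => ?_)
  have hpairs : flat.foldl (fun d value =>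
        d.modify (PySem.Int.mod value new_size) [] (fun l => l ++ [value])) PySem.Dict.empty
      = (flat.map (fun v => (PySem.Int.mod v new_size, v))).foldl
          (fun d p => d.modify p.1 [] (fun l => l ++ [p.2])) PySem.Dict.empty := by
    rw [List.foldl_map]
  rw [hpairs, PySem.Dict.getD_foldl_modify_append]
  simp [List.filter_map, Function.comp_def]

-- ===== VERDICT (by name: the statement is the Claim_ definition above) =====
theorem chains_resize_spec : Claim_equal_chains_resize := by
  intro ht ns _ _
  unfold Spec_chains_resize
  exact chains_resize_eq_alt ht ns
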